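-- pv_equiv track=rewrite | github.com/jlanej/kmer_denovo_filter | src/kmer_denovo_filter/kmer_utils.py | _descendants_of
-- ===== SOURCE A (Python) =====
-- def _descendants_of(parent_map, root_taxid):
--     """Return the set of taxids that descend from *root_taxid*.
--
--     Walks the full taxonomy tree cached in *parent_map* (a
--     ``{child: parent}`` dict) and returns all taxids whose lineage
--     passes through *root_taxid* (inclusive).
--     """
--     members = set()
--     non_members = set()
--
--     def _is_member(taxid):
--         if taxid in members:
--             return True
--         if taxid in non_members:
--             return False
--         path = []
--         cur = taxid
--         while cur not in members and cur not in non_members: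
--             if cur == root_taxid:
--                 members.update(path)
--                 members.add(cur)
--                 return True
--             if cur == 1 or cur == 0 or cur not in parent_map:
--                 non_members.update(path)
--                 non_members.add(cur)
--                 return False
--             path.append(cur)
--             cur = parent_map[cur]
--         if cur in members:
--             members.update(path)
--             return True
--         non_members.update(path)
--         return False
--
--     for taxid in parent_map:
--         _is_member(taxid)
--     return members
-- ===== SOURCE B (Python) =====
-- def _descendants_of(parent_map, root_taxid):
--     """Return the set of taxids that descend from *root_taxid* (inclusive).
--
--     Inverts *parent_map* into a parent -> children adjacency dict, then
--     collects everything reachable from *root_taxid* with an explicit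
--     depth-first stack.  The root is counted only when the taxonomy
--     mentions it (it is a node or has children).
--     """
--     children = {}
--     for child, parent in parent_map.items():
--         if child not in (0, 1) and child != root_taxid:
--             children.setdefault(parent, []).append(child)
--     if root_taxid not in parent_map and root_taxid not in children:
--         return set()
--     result = {root_taxid}
--     stack = [root_taxid]
--     while stack:
--         node = stack.pop()
--         for child in children.get(node, []):
--             if child not in result:
--                 result.add(child)
--                 stack.append(child)
--     return result
-- ===== Notes on version B (the rewrite author's own statement) =====
-- stated objective: idiomatic
-- what changed: A walks memoized ancestor chains upward for every taxid; B inverts parent_map once into a parent->children adjacency dict and collects the descendants of root_taxid top-down with an explicit stack, including the root only when the taxonomy mentions it.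
import Mathlib
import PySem

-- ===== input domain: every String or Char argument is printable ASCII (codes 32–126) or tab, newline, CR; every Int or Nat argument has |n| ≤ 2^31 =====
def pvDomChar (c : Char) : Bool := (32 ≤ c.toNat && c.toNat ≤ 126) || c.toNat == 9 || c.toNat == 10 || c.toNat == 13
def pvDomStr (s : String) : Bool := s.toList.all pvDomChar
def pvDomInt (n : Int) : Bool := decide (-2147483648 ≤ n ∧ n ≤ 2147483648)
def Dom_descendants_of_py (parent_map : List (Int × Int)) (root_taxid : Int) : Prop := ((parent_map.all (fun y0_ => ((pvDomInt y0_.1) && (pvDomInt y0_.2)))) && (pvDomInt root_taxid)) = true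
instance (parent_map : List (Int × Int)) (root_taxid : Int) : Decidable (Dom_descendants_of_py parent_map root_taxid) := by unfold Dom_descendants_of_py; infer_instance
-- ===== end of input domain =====

-- B replaces A's memoized upward chain-walk by inverting the map into a child-adjacency
-- dict and collecting descendants with an explicit stack (idiomatic tree traversal).
-- Python returns a set (iteration order unspecified): both ports return it in ascending order.

-- ===== PORT A =====
-- the inner 'while' of _is_member, with fuel (under Pre_ the chain halts before fuel runs out);
-- state: path, cur, members, non_members; returns (bool result, members, non_members)
def pvAWalk (pm : List (Int × Int)) (root : Int) :
    Nat → List Int → Int → List Int → List Int → (Bool × List Int × List Int)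
  | 0, _, _, M, N => (false, M, N)
  | fuel+1, path, cur, M, N =>
    if cur ∈ M then (true, PySem.Set.update M path, N)
    else if cur ∈ N then (false, M, PySem.Set.update N path)
    else if cur = root then (true, PySem.Set.add (PySem.Set.update M path) cur, N)
    else if cur = 1 ∨ cur = 0 ∨ pm.lookup cur = none then
      (false, M, PySem.Set.add (PySem.Set.update N path) cur)
    else pvAWalk pm root fuel (path ++ [cur]) ((pm.lookup cur).getD 0) M N

def descendants_of_py (parent_map : List (Int × Int)) (root_taxid : Int) : List Int :=
  PySem.List.sorted
    (parent_map.foldl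
      (fun (MN : List Int × List Int) p =>
        (pvAWalk parent_map root_taxid (parent_map.length + 1) [] p.1 MN.1 MN.2).2)
      ([], [])).1
    (fun x => x) false

-- ===== PORT B =====
-- children = {}; for child, parent in parent_map.items(): … setdefault(parent, []).append(child)
def pvBChildren (pm : List (Int × Int)) (root : Int) : PySem.Dict Int (List Int) :=
  pm.foldl
    (fun d p =>
      if p.1 ≠ 0 ∧ p.1 ≠ 1 ∧ p.1 ≠ root then d.modify p.2 [] (· ++ [p.1]) else d)
    PySem.Dict.empty

-- the 'while stack:' loop, with fuel (|pm|+2 always suffices: each iteration pops one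
-- element and only pushes taxids not yet in result)
def pvBLoop (children : PySem.Dict Int (List Int)) :
    Nat → List Int → List Int → List Int
  | 0, _, res => res
  | fuel+1, stack, res =>
    if h : stack = [] then res
    else
      let node := stack.getLast h
      let s := (children.getD node []).foldl
        (fun (rs : List Int × List Int) c =>
          if c ∈ rs.1 then rs else (PySem.Set.add rs.1 c, rs.2 ++ [c]))
        (res, stack.dropLast)
      pvBLoop children fuel s.2 s.1

def descendants_of_py_alt (parent_map : List (Int × Int)) (root_taxid : Int) : List Int :=
  let children := pvBChildren parent_map root_taxid
  if parent_map.lookup root_taxid = none ∧ ¬ children.contains root_taxid = true then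
    []
  else
    PySem.List.sorted (pvBLoop children (parent_map.length + 2) [root_taxid] [root_taxid])
      (fun x => x) false

-- ===== PRECONDITION & SPEC =====
-- one step along the parent pointers (fixes the halting taxids root/1/0/missing)
def pvStep (pm : List (Int × Int)) (root x : Int) : Int :=
  if x = root ∨ x = 1 ∨ x = 0 then x else (pm.lookup x).getD x

def pvHalts (pm : List (Int × Int)) (root x : Int) : Bool :=
  x == root || x == 1 || x == 0 || (pm.lookup x).isNone

-- parent_map denotes a Python dict, so its association-list image has distinct keys; and
-- from every key the parent chain must reach root, 1, 0 or a missing taxid within |pm|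
-- steps (i.e. no parent-pointer cycle): on a cyclic parent_map the Python A loops forever.
def Pre_descendants_of_py (parent_map : List (Int × Int)) (root_taxid : Int) : Prop :=
  (parent_map.map Prod.fst).Nodup ∧
  ∀ k ∈ parent_map.map Prod.fst,
    ∃ j < parent_map.length + 1, pvHalts parent_map root_taxid ((pvStep parent_map root_taxid)^[j] k) = true

instance (parent_map : List (Int × Int)) (root_taxid : Int) : Decidable (Pre_descendants_of_py parent_map root_taxid) := by unfold Pre_descendants_of_py; infer_instance

def pvWitness_descendants_of_py : (List (Int × Int)) × Int := ([(2, 5), (3, 2)], 5)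

def Spec_descendants_of_py (parent_map : List (Int × Int)) (root_taxid : Int) (out : List Int) : Prop := out = descendants_of_py_alt parent_map root_taxid
instance (parent_map : List (Int × Int)) (root_taxid : Int) (out : List Int) : Decidable (Spec_descendants_of_py parent_map root_taxid out) := by unfold Spec_descendants_of_py; infer_instance

-- ===== CLAIM (what is proved, stated in full; the proofs are below) =====
def Claim_equal_descendants_of_py : Prop := ∀ (parent_map : List (Int × Int)) (root_taxid : Int), Dom_descendants_of_py parent_map root_taxid → Pre_descendants_of_py parent_map root_taxid → Spec_descendants_of_py parent_map root_taxid (descendants_of_py parent_map root_taxid)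

-- ===== LEMMAS AND PROOFS =====

-- x's parent chain reaches root
def pvReaches (pm : List (Int × Int)) (root x : Int) : Prop :=
  ∃ j : Nat, (pvStep pm root)^[j] x = root

theorem pvStep_fix {pm : List (Int × Int)} {root x : Int}
    (h : pvHalts pm root x = true) : pvStep pm root x = x := by
  unfold pvStep
  by_cases hc : x = root ∨ x = 1 ∨ x = 0
  · simp [hc]
  · have hn : pm.lookup x = none := by
      simp only [pvHalts, Bool.or_eq_true, beq_iff_eq, Option.isNone_iff_eq_none] at h
      tauto
    simp [hc, hn]

theorem pvReaches_root (pm : List (Int × Int)) (root : Int) : pvReaches pm root root :=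
  ⟨0, rfl⟩

theorem not_reaches_of_halts {pm : List (Int × Int)} {root x : Int}
    (h : pvHalts pm root x = true) (hne : x ≠ root) : ¬ pvReaches pm root x := by
  rintro ⟨j, hj⟩
  rw [Function.iterate_fixed (pvStep_fix h)] at hj
  exact hne hj

theorem reaches_iff_step {pm : List (Int × Int)} {root x : Int}
    (h : pvHalts pm root x = false) :
    pvReaches pm root x ↔ pvReaches pm root (pvStep pm root x) := by
  have hxr : x ≠ root := by
    intro hx
    simp [pvHalts, hx] at h
  constructor
  · rintro ⟨j, hj⟩
    match j, hj with
    | 0, hj => exact absurd hj hxr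
    | j+1, hj =>
      rw [Function.iterate_succ_apply] at hj
      exact ⟨j, hj⟩
  · rintro ⟨j, hj⟩
    exact ⟨j + 1, by rw [Function.iterate_succ_apply]; exact hj⟩

theorem lookup_mem_keys {pm : List (Int × Int)} {x p : Int}
    (h : pm.lookup x = some p) : x ∈ pm.map Prod.fst := by
  induction pm with
  | nil => simp [List.lookup] at h
  | cons q t ih =>
    rw [List.lookup_cons] at h
    by_cases hq : x == q.1
    · simp only [beq_iff_eq] at hq
      simp [hq]
    · simp only [hq] at h
      simp [ih h]

theorem lookup_eq_none_iff {pm : List (Int × Int)} {x : Int} :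
    pm.lookup x = none ↔ x ∉ pm.map Prod.fst := by
  induction pm with
  | nil => simp [List.lookup]
  | cons q t ih =>
    rw [List.lookup_cons]
    by_cases hq : x == q.1
    · simp only [beq_iff_eq] at hq
      simp [hq]
    · simp only [hq]
      simp only [beq_iff_eq] at hq
      simp [ih, hq]

theorem mem_lookup_of_nodup {pm : List (Int × Int)} {c p : Int}
    (hnd : (pm.map Prod.fst).Nodup) (h : (c, p) ∈ pm) : pm.lookup c = some p := by
  induction pm with
  | nil => simp at h
  | cons q t ih =>
    simp only [List.map_cons, List.nodup_cons] at hnd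
    rw [List.lookup_cons]
    rcases List.mem_cons.1 h with h | h
    · simp [← h]
    · have hne : ¬ (c == q.1) := by
        simp only [beq_iff_eq]
        intro hqc
        exact hnd.1 (by rw [← hqc]; exact List.mem_map_of_mem h)
      simp only [hne]
      exact ih hnd.2 h

-- invariant carried through A's outer loop
def pvAInv (pm : List (Int × Int)) (root : Int) (M N : List Int) : Prop :=
  M.Nodup ∧ N.Nodup ∧
  (∀ x ∈ M, pvReaches pm root x ∧ (x ∈ pm.map Prod.fst ∨ x = root)) ∧
  (M = [] ∨ root ∈ M) ∧
  (root ∈ M → ∃ k ∈ pm.map Prod.fst, pvReaches pm root k) ∧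
  (∀ x ∈ N, ¬ pvReaches pm root x)

theorem pvAWalk_succ (pm : List (Int × Int)) (root : Int) (f : Nat) (path : List Int)
    (cur : Int) (M N : List Int) :
    pvAWalk pm root (f+1) path cur M N =
    (if cur ∈ M then (true, PySem.Set.update M path, N)
    else if cur ∈ N then (false, M, PySem.Set.update N path)
    else if cur = root then (true, PySem.Set.add (PySem.Set.update M path) cur, N)
    else if cur = 1 ∨ cur = 0 ∨ pm.lookup cur = none then
      (false, M, PySem.Set.add (PySem.Set.update N path) cur)
    else pvAWalk pm root f (path ++ [cur]) ((pm.lookup cur).getD 0) M N) := rfl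

theorem pvAWalk_spec (pm : List (Int × Int)) (root : Int) :
    ∀ (fuel : Nat) (path : List Int) (cur : Int) (M N : List Int),
    pvAInv pm root M N →
    (∀ x ∈ path, (pvReaches pm root x ↔ pvReaches pm root cur)) →
    (∀ x ∈ path, x ∈ pm.map Prod.fst) →
    (path = [] → cur ∈ pm.map Prod.fst) →
    (∃ j < fuel, pvHalts pm root ((pvStep pm root)^[j] cur) = true) →
    pvAInv pm root (pvAWalk pm root fuel path cur M N).2.1 (pvAWalk pm root fuel path cur M N).2.2 ∧
    (∀ x ∈ M, x ∈ (pvAWalk pm root fuel path cur M N).2.1) ∧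
    (∀ x ∈ N, x ∈ (pvAWalk pm root fuel path cur M N).2.2) ∧
    (cur ∈ (pvAWalk pm root fuel path cur M N).2.1 ∨ cur ∈ (pvAWalk pm root fuel path cur M N).2.2) ∧
    (∀ x ∈ path, x ∈ (pvAWalk pm root fuel path cur M N).2.1 ∨ x ∈ (pvAWalk pm root fuel path cur M N).2.2) := by
  intro fuel
  induction fuel with
  | zero =>
    intro path cur M N _ _ _ _ hfuel
    obtain ⟨j, hj, _⟩ := hfuel
    omega
  | succ f ih =>
    intro path cur M N hInv hpiff hpk hp0 hfuel
    obtain ⟨hMnd, hNnd, hM, hMne, hMr, hN⟩ := hInv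
    rw [pvAWalk_succ]
    by_cases h1 : cur ∈ M
    · simp only [if_pos h1]
      refine ⟨⟨PySem.Set.nodup_update _ _ hMnd, hNnd, ?_, ?_, ?_, hN⟩, ?_, ?_, ?_, ?_⟩
      · intro x hx
        rcases (PySem.Set.mem_update _ _ _).1 hx with hx | hx
        · exact hM x hx
        · exact ⟨(hpiff x hx).2 ((hM cur h1).1), Or.inl (hpk x hx)⟩
      · right
        rcases hMne with hMne | hMne
        · rw [hMne] at h1; simp at h1
        · exact (PySem.Set.mem_update _ _ _).2 (Or.inl hMne)
      · intro hr
        rcases (PySem.Set.mem_update _ _ _).1 hr with hr | hr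
        · exact hMr hr
        · exact ⟨root, hpk root hr, pvReaches_root pm root⟩
      · exact fun x hx => (PySem.Set.mem_update _ _ _).2 (Or.inl hx)
      · exact fun x hx => hx
      · exact Or.inl ((PySem.Set.mem_update _ _ _).2 (Or.inl h1))
      · exact fun x hx => Or.inl ((PySem.Set.mem_update _ _ _).2 (Or.inr hx))
    · by_cases h2 : cur ∈ N
      · simp only [if_neg h1, if_pos h2]
        refine ⟨⟨hMnd, PySem.Set.nodup_update _ _ hNnd, hM, hMne, hMr, ?_⟩, ?_, ?_, ?_, ?_⟩
        · intro x hx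
          rcases (PySem.Set.mem_update _ _ _).1 hx with hx | hx
          · exact hN x hx
          · intro hrx
            exact hN cur h2 ((hpiff x hx).1 hrx)
        · exact fun x hx => hx
        · exact fun x hx => (PySem.Set.mem_update _ _ _).2 (Or.inl hx)
        · exact Or.inr ((PySem.Set.mem_update _ _ _).2 (Or.inl h2))
        · exact fun x hx => Or.inr ((PySem.Set.mem_update _ _ _).2 (Or.inr hx))
      · by_cases h3 : cur = root
        · simp only [if_neg h1, if_neg h2, if_pos h3]
          subst h3
          refine ⟨⟨PySem.Set.nodup_add _ _ (PySem.Set.nodup_update _ _ hMnd), hNnd, ?_, ?_, ?_, hN⟩, ?_, ?_, ?_, ?_⟩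
          · intro x hx
            rcases (PySem.Set.mem_add _ _ _).1 hx with hx | hx
            · rcases (PySem.Set.mem_update _ _ _).1 hx with hx | hx
              · exact hM x hx
              · exact ⟨(hpiff x hx).2 (pvReaches_root pm cur), Or.inl (hpk x hx)⟩
            · exact ⟨hx ▸ pvReaches_root pm cur, Or.inr hx⟩
          · exact Or.inr ((PySem.Set.mem_add _ _ _).2 (Or.inr rfl))
          · intro _
            match path, hpiff, hpk, hp0 with
            | [], _, _, hp0 => exact ⟨cur, hp0 rfl, pvReaches_root pm cur⟩
            | y :: t, hpiff, hpk, _ =>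
              exact ⟨y, hpk y (List.mem_cons_self), (hpiff y List.mem_cons_self).2 (pvReaches_root pm cur)⟩
          · exact fun x hx => (PySem.Set.mem_add _ _ _).2 (Or.inl ((PySem.Set.mem_update _ _ _).2 (Or.inl hx)))
          · exact fun x hx => hx
          · exact Or.inl ((PySem.Set.mem_add _ _ _).2 (Or.inr rfl))
          · exact fun x hx => Or.inl ((PySem.Set.mem_add _ _ _).2 (Or.inl ((PySem.Set.mem_update _ _ _).2 (Or.inr hx))))
        · by_cases h4 : cur = 1 ∨ cur = 0 ∨ pm.lookup cur = none
          · simp only [if_neg h1, if_neg h2, if_neg h3, if_pos h4]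
            have hcurh : pvHalts pm root cur = true := by
              simp only [pvHalts, Bool.or_eq_true, beq_iff_eq, Option.isNone_iff_eq_none]
              tauto
            have hnr : ¬ pvReaches pm root cur := not_reaches_of_halts hcurh h3
            refine ⟨⟨hMnd, PySem.Set.nodup_add _ _ (PySem.Set.nodup_update _ _ hNnd), hM, hMne, hMr, ?_⟩, ?_, ?_, ?_, ?_⟩
            · intro x hx
              rcases (PySem.Set.mem_add _ _ _).1 hx with hx | hx
              · rcases (PySem.Set.mem_update _ _ _).1 hx with hx | hx
                · exact hN x hx
                · exact fun hrx => hnr ((hpiff x hx).1 hrx)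
              · exact hx ▸ hnr
            · exact fun x hx => hx
            · exact fun x hx => (PySem.Set.mem_add _ _ _).2 (Or.inl ((PySem.Set.mem_update _ _ _).2 (Or.inl hx)))
            · exact Or.inr ((PySem.Set.mem_add _ _ _).2 (Or.inr rfl))
            · exact fun x hx => Or.inr ((PySem.Set.mem_add _ _ _).2 (Or.inl ((PySem.Set.mem_update _ _ _).2 (Or.inr hx))))
          · simp only [if_neg h1, if_neg h2, if_neg h3, if_neg h4]
            push Not at h4
            obtain ⟨h41, h40, h4l⟩ := h4
            obtain ⟨p, hp⟩ := Option.ne_none_iff_exists'.1 h4l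
            have hnh : pvHalts pm root cur = false := by
              simp only [pvHalts, Bool.or_eq_false_iff, beq_eq_false_iff_ne, ne_eq,
                Option.isNone_eq_false_iff, Option.isSome_iff_ne_none]
              exact ⟨⟨⟨h3, h41⟩, h40⟩, h4l⟩
            have hstep : (pm.lookup cur).getD 0 = pvStep pm root cur := by
              unfold pvStep
              have : ¬ (cur = root ∨ cur = 1 ∨ cur = 0) := by tauto
              simp [this, hp]
            rw [hstep]
            have hiff := reaches_iff_step (pm := pm) (root := root) (x := cur) hnh
            have hres := ih (path ++ [cur]) (pvStep pm root cur) M N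
              ⟨hMnd, hNnd, hM, hMne, hMr, hN⟩
              (by
                intro x hx
                rcases List.mem_append.1 hx with hx | hx
                · exact (hpiff x hx).trans hiff
                · rw [List.mem_singleton.1 hx]
                  exact hiff)
              (by
                intro x hx
                rcases List.mem_append.1 hx with hx | hx
                · exact hpk x hx
                · rw [List.mem_singleton.1 hx]
                  exact lookup_mem_keys hp)
              (by simp)
              (by
                obtain ⟨j, hj, hH⟩ := hfuel
                match j, hj, hH with
                | 0, _, hH => rw [Function.iterate_zero_apply] at hH; rw [hnh] at hH; cases hH
                | j+1, hj, hH =>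
                  rw [Function.iterate_succ_apply] at hH
                  exact ⟨j, by omega, hH⟩)
            refine ⟨hres.1, hres.2.1, hres.2.2.1, ?_, ?_⟩
            · exact hres.2.2.2.2 cur (List.mem_append.2 (Or.inr (List.mem_singleton.2 rfl)))
            · exact fun x hx => hres.2.2.2.2 x (List.mem_append.2 (Or.inl hx))

theorem pvAFold_spec (pm : List (Int × Int)) (root : Int)
    (hpre : Pre_descendants_of_py pm root) :
    ∀ (l : List (Int × Int)) (M N : List Int),
    (∀ p ∈ l, p ∈ pm) →
    pvAInv pm root M N →
    pvAInv pm root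
      (l.foldl (fun (MN : List Int × List Int) p => (pvAWalk pm root (pm.length + 1) [] p.1 MN.1 MN.2).2) (M, N)).1
      (l.foldl (fun (MN : List Int × List Int) p => (pvAWalk pm root (pm.length + 1) [] p.1 MN.1 MN.2).2) (M, N)).2 ∧
    (∀ x ∈ M, x ∈ (l.foldl (fun (MN : List Int × List Int) p => (pvAWalk pm root (pm.length + 1) [] p.1 MN.1 MN.2).2) (M, N)).1) ∧
    (∀ x ∈ N, x ∈ (l.foldl (fun (MN : List Int × List Int) p => (pvAWalk pm root (pm.length + 1) [] p.1 MN.1 MN.2).2) (M, N)).2) ∧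
    (∀ p ∈ l, p.1 ∈ (l.foldl (fun (MN : List Int × List Int) p => (pvAWalk pm root (pm.length + 1) [] p.1 MN.1 MN.2).2) (M, N)).1 ∨
              p.1 ∈ (l.foldl (fun (MN : List Int × List Int) p => (pvAWalk pm root (pm.length + 1) [] p.1 MN.1 MN.2).2) (M, N)).2) := by
  intro l
  induction l with
  | nil =>
    intro M N _ hInv
    exact ⟨hInv, fun x hx => hx, fun x hx => hx, by simp⟩
  | cons q t ih =>
    intro M N hmem hInv
    have hqk : q.1 ∈ pm.map Prod.fst := List.mem_map_of_mem (hmem q List.mem_cons_self)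
    have hwalk := pvAWalk_spec pm root (pm.length + 1) [] q.1 M N hInv
      (by simp) (by simp) (fun _ => hqk) (hpre.2 q.1 hqk)
    simp only [List.foldl_cons]
    have hrest := ih (pvAWalk pm root (pm.length + 1) [] q.1 M N).2.1
      (pvAWalk pm root (pm.length + 1) [] q.1 M N).2.2
      (fun p hp => hmem p (List.mem_cons_of_mem q hp)) hwalk.1
    refine ⟨hrest.1, ?_, ?_, ?_⟩
    · exact fun x hx => hrest.2.1 x (hwalk.2.1 x hx)
    · exact fun x hx => hrest.2.2.1 x (hwalk.2.2.1 x hx)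
    · intro p hp
      rcases List.mem_cons.1 hp with hp | hp
      · subst hp
        rcases hwalk.2.2.2.1 with hc | hc
        · exact Or.inl (hrest.2.1 _ hc)
        · exact Or.inr (hrest.2.2.1 _ hc)
      · exact hrest.2.2.2 p hp

-- characterization of A's members set
theorem pvAInv_init (pm : List (Int × Int)) (root : Int) : pvAInv pm root [] [] := by
  refine ⟨List.nodup_nil, List.nodup_nil, by simp, Or.inl rfl, by simp, by simp⟩

theorem pvA_members_iff (pm : List (Int × Int)) (root : Int)
    (hpre : Pre_descendants_of_py pm root) (x : Int) :
    x ∈ (pm.foldl (fun (MN : List Int × List Int) p => (pvAWalk pm root (pm.length + 1) [] p.1 MN.1 MN.2).2) ([], [])).1 ↔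
    ((x ∈ pm.map Prod.fst ∧ pvReaches pm root x) ∨
     (x = root ∧ ∃ k ∈ pm.map Prod.fst, pvReaches pm root k)) := by
  have h := pvAFold_spec pm root hpre pm [] [] (fun p hp => hp) (pvAInv_init pm root)
  obtain ⟨⟨_, _, hM, hMne, hMr, hN⟩, _, _, hall⟩ := h
  constructor
  · intro hx
    rcases hM x hx with ⟨hrx, hk | hk⟩
    · exact Or.inl ⟨hk, hrx⟩
    · subst hk
      exact Or.inr ⟨rfl, hMr hx⟩
  · rintro (⟨hk, hrx⟩ | ⟨hxr, k, hk, hrk⟩)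
    · obtain ⟨p, hp, hpx⟩ := List.mem_map.1 hk
      rcases hall p hp with hc | hc
      · exact hpx ▸ hc
      · exact absurd hrx (hpx ▸ hN _ hc)
    · rw [hxr]
      have hkM : k ∈ (pm.foldl (fun (MN : List Int × List Int) p => (pvAWalk pm root (pm.length + 1) [] p.1 MN.1 MN.2).2) ([], [])).1 := by
        obtain ⟨p, hp, hpx⟩ := List.mem_map.1 hk
        rcases hall p hp with hc | hc
        · exact hpx ▸ hc
        · exact absurd hrk (hpx ▸ hN _ hc)
      rcases hMne with hMne | hMne
      · rw [hMne] at hkM; cases hkM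
      · exact hMne

theorem pvA_members_nodup (pm : List (Int × Int)) (root : Int)
    (hpre : Pre_descendants_of_py pm root) :
    (pm.foldl (fun (MN : List Int × List Int) p => (pvAWalk pm root (pm.length + 1) [] p.1 MN.1 MN.2).2) ([], [])).1.Nodup :=
  (pvAFold_spec pm root hpre pm [] [] (fun p hp => hp) (pvAInv_init pm root)).1.1

-- B: the children adjacency list
theorem pvBChildren_foldl (root : Int) :
    ∀ (l : List (Int × Int)) (d : PySem.Dict Int (List Int)) (p : Int),
    (l.foldl (fun d q => if q.1 ≠ 0 ∧ q.1 ≠ 1 ∧ q.1 ≠ root then d.modify q.2 [] (· ++ [q.1]) else d) d).getD p [] =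
    d.getD p [] ++ (l.filter (fun q => decide (q.1 ≠ 0 ∧ q.1 ≠ 1 ∧ q.1 ≠ root) && (q.2 == p))).map Prod.fst := by
  intro l
  induction l with
  | nil => intro d p; simp
  | cons q t ih =>
    intro d p
    simp only [List.foldl_cons]
    by_cases hc : q.1 ≠ 0 ∧ q.1 ≠ 1 ∧ q.1 ≠ root
    · rw [if_pos hc, ih, List.filter_cons]
      by_cases hp : q.2 = p
      · rw [if_pos (by simp [hc, hp])]
        rw [PySem.Dict.getD_modify]
        rw [if_pos (Eq.symm hp)]
        rw [hp]
        simp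
      · rw [if_neg (by simp [hp])]
        rw [PySem.Dict.getD_modify]
        rw [if_neg (fun h => hp (Eq.symm h))]
    · rw [if_neg hc, ih, List.filter_cons]
      rw [if_neg (by simp only [Bool.and_eq_true, decide_eq_true_eq]; tauto)]

theorem pvBChildren_getD (pm : List (Int × Int)) (root p : Int) :
    (pvBChildren pm root).getD p [] =
      (pm.filter (fun q => decide (q.1 ≠ 0 ∧ q.1 ≠ 1 ∧ q.1 ≠ root) && (q.2 == p))).map Prod.fst := by
  unfold pvBChildren
  rw [pvBChildren_foldl]
  simp

theorem pvBChildren_mem {pm : List (Int × Int)} {root p c : Int} :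
    c ∈ (pvBChildren pm root).getD p [] ↔
      ((c, p) ∈ pm ∧ c ≠ 0 ∧ c ≠ 1 ∧ c ≠ root) := by
  rw [pvBChildren_getD]
  simp only [List.mem_map, List.mem_filter, Bool.and_eq_true, decide_eq_true_eq, beq_iff_eq]
  constructor
  · rintro ⟨q, ⟨hq, hcond, hq2⟩, hq1⟩
    have : q = (c, p) := by
      cases q
      simp_all
    rw [this] at hq
    exact ⟨hq, hq1 ▸ hcond⟩
  · rintro ⟨hq, hc⟩
    exact ⟨(c, p), ⟨hq, hc, rfl⟩, rfl⟩

theorem pvBChildren_contains_aux (root : Int) :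
    ∀ (l : List (Int × Int)) (d : PySem.Dict Int (List Int)),
    (∀ p, d.contains p = true ↔ d.getD p [] ≠ []) →
    ∀ p, (l.foldl (fun d q => if q.1 ≠ 0 ∧ q.1 ≠ 1 ∧ q.1 ≠ root then d.modify q.2 [] (· ++ [q.1]) else d) d).contains p = true ↔
         (l.foldl (fun d q => if q.1 ≠ 0 ∧ q.1 ≠ 1 ∧ q.1 ≠ root then d.modify q.2 [] (· ++ [q.1]) else d) d).getD p [] ≠ [] := by
  intro l
  induction l with
  | nil => intro d h p; exact h p
  | cons q t ih =>
    intro d h p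
    simp only [List.foldl_cons]
    by_cases hc : q.1 ≠ 0 ∧ q.1 ≠ 1 ∧ q.1 ≠ root
    · rw [if_pos hc]
      refine ih _ ?_ p
      intro p'
      rw [PySem.Dict.contains_modify, PySem.Dict.getD_modify]
      by_cases hp : p' = q.2
      · simp [hp]
      · have : ¬ (p' == q.2) = true := by simp [hp]
        simp only [this, hp, if_false, Bool.false_or]
        exact h p'
    · rw [if_neg hc]
      exact ih d h p

theorem pvBChildren_contains (pm : List (Int × Int)) (root p : Int) :
    (pvBChildren pm root).contains p = true ↔ (pvBChildren pm root).getD p [] ≠ [] := by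
  unfold pvBChildren
  exact pvBChildren_contains_aux root pm PySem.Dict.empty (by simp) p

-- the set B collects
def pvGood (pm : List (Int × Int)) (root x : Int) : Prop :=
  x = root ∨ (x ∈ pm.map Prod.fst ∧ pvReaches pm root x)

theorem lookup_mem {pm : List (Int × Int)} {c p : Int}
    (h : pm.lookup c = some p) : (c, p) ∈ pm := by
  induction pm with
  | nil => simp [List.lookup] at h
  | cons q t ih =>
    rw [List.lookup_cons] at h
    by_cases hq : c == q.1
    · simp only [hq] at h
      simp only [beq_iff_eq] at hq
      cases h
      have : q = (c, q.2) := by cases q; simp_all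
      rw [this]
      exact List.mem_cons_self
    · simp only [hq] at h
      exact List.mem_cons_of_mem _ (ih h)

theorem pvBFold_spec :
    ∀ (cs res stack : List Int),
    res.Nodup → stack.Nodup → (∀ x ∈ stack, x ∈ res) →
    ((cs.foldl (fun (rs : List Int × List Int) c =>
        if c ∈ rs.1 then rs else (PySem.Set.add rs.1 c, rs.2 ++ [c])) (res, stack)).1.Nodup ∧
     (cs.foldl (fun (rs : List Int × List Int) c =>
        if c ∈ rs.1 then rs else (PySem.Set.add rs.1 c, rs.2 ++ [c])) (res, stack)).2.Nodup ∧
     (∀ x ∈ (cs.foldl (fun (rs : List Int × List Int) c =>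
        if c ∈ rs.1 then rs else (PySem.Set.add rs.1 c, rs.2 ++ [c])) (res, stack)).2,
        x ∈ (cs.foldl (fun (rs : List Int × List Int) c =>
        if c ∈ rs.1 then rs else (PySem.Set.add rs.1 c, rs.2 ++ [c])) (res, stack)).1) ∧
     (∀ x ∈ res, x ∈ (cs.foldl (fun (rs : List Int × List Int) c =>
        if c ∈ rs.1 then rs else (PySem.Set.add rs.1 c, rs.2 ++ [c])) (res, stack)).1) ∧
     (∀ x ∈ stack, x ∈ (cs.foldl (fun (rs : List Int × List Int) c =>
        if c ∈ rs.1 then rs else (PySem.Set.add rs.1 c, rs.2 ++ [c])) (res, stack)).2) ∧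
     (∀ c ∈ cs, c ∈ (cs.foldl (fun (rs : List Int × List Int) c =>
        if c ∈ rs.1 then rs else (PySem.Set.add rs.1 c, rs.2 ++ [c])) (res, stack)).1) ∧
     (∀ x ∈ (cs.foldl (fun (rs : List Int × List Int) c =>
        if c ∈ rs.1 then rs else (PySem.Set.add rs.1 c, rs.2 ++ [c])) (res, stack)).1,
        x ∈ res ∨ x ∈ cs) ∧
     (∀ x ∈ (cs.foldl (fun (rs : List Int × List Int) c =>
        if c ∈ rs.1 then rs else (PySem.Set.add rs.1 c, rs.2 ++ [c])) (res, stack)).1,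
        x ∈ res ∨ x ∈ (cs.foldl (fun (rs : List Int × List Int) c =>
        if c ∈ rs.1 then rs else (PySem.Set.add rs.1 c, rs.2 ++ [c])) (res, stack)).2) ∧
     ((cs.foldl (fun (rs : List Int × List Int) c =>
        if c ∈ rs.1 then rs else (PySem.Set.add rs.1 c, rs.2 ++ [c])) (res, stack)).1.length + stack.length =
      res.length + (cs.foldl (fun (rs : List Int × List Int) c =>
        if c ∈ rs.1 then rs else (PySem.Set.add rs.1 c, rs.2 ++ [c])) (res, stack)).2.length)) := by
  intro cs
  induction cs with
  | nil =>
    intro res stack h1 h2 h3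
    exact ⟨h1, h2, h3, fun x hx => hx, fun x hx => hx, by simp, fun x hx => Or.inl hx,
      fun x hx => Or.inl hx, rfl⟩
  | cons c t ih =>
    intro res stack h1 h2 h3
    simp only [List.foldl_cons]
    by_cases hc : c ∈ res
    · rw [if_pos hc]
      obtain ⟨i1, i2, i3, i4, i5, i6, i7, i8, i9⟩ := ih res stack h1 h2 h3
      exact ⟨i1, i2, i3, i4, i5,
        fun x hx => (List.mem_cons.1 hx).elim (fun h => h ▸ i4 c hc) (i6 x),
        fun x hx => (i7 x hx).elim Or.inl (fun h => Or.inr (List.mem_cons_of_mem _ h)),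
        i8, i9⟩
    · rw [if_neg hc]
      have hcs : c ∉ stack := fun h => hc (h3 c h)
      have hstk : (stack ++ [c]).Nodup := by
        rw [← PySem.Set.add_of_not_mem hcs]
        exact PySem.Set.nodup_add _ _ h2
      have hsub : ∀ x ∈ stack ++ [c], x ∈ PySem.Set.add res c := by
        intro x hx
        rcases List.mem_append.1 hx with hx | hx
        · exact (PySem.Set.mem_add _ _ _).2 (Or.inl (h3 x hx))
        · exact (PySem.Set.mem_add _ _ _).2 (Or.inr (List.mem_singleton.1 hx))
      obtain ⟨i1, i2, i3, i4, i5, i6, i7, i8, i9⟩ :=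
        ih (PySem.Set.add res c) (stack ++ [c]) (PySem.Set.nodup_add _ _ h1) hstk hsub
      refine ⟨i1, i2, i3, ?_, ?_, ?_, ?_, ?_, ?_⟩
      · exact fun x hx => i4 x ((PySem.Set.mem_add _ _ _).2 (Or.inl hx))
      · exact fun x hx => i5 x (List.mem_append.2 (Or.inl hx))
      · intro x hx
        rcases List.mem_cons.1 hx with hx | hx
        · exact hx ▸ i4 c ((PySem.Set.mem_add _ _ _).2 (Or.inr rfl))
        · exact i6 x hx
      · intro x hx
        rcases i7 x hx with hx | hx
        · rcases (PySem.Set.mem_add _ _ _).1 hx with hx | hx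
          · exact Or.inl hx
          · exact Or.inr (hx ▸ List.mem_cons_self)
        · exact Or.inr (List.mem_cons_of_mem _ hx)
      · intro x hx
        rcases i8 x hx with hx | hx
        · rcases (PySem.Set.mem_add _ _ _).1 hx with hx | hx
          · exact Or.inl hx
          · refine Or.inr (i5 x ?_)
            exact List.mem_append.2 (Or.inr (hx ▸ List.mem_singleton.2 rfl))
        · exact Or.inr hx
      · have hla : (PySem.Set.add res c).length = res.length + 1 := by
          rw [PySem.Set.add_of_not_mem hc, List.length_append, List.length_singleton]
        have hls : (stack ++ [c]).length = stack.length + 1 := by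
          rw [List.length_append, List.length_singleton]
        omega

theorem pvBLoop_spec (pm : List (Int × Int)) (root : Int)
    (hnd : (pm.map Prod.fst).Nodup) :
    ∀ (fuel : Nat) (stack res : List Int),
    res.Nodup → stack.Nodup →
    (∀ x ∈ stack, x ∈ res) →
    (∀ x ∈ res, pvGood pm root x) →
    root ∈ res →
    (∀ u ∈ res, u ∉ stack → ∀ c ∈ (pvBChildren pm root).getD u [], c ∈ res) →
    stack.length + ((PySem.Set.ofList (pm.map Prod.fst)).length + 1) < fuel + res.length →
    ((pvBLoop (pvBChildren pm root) fuel stack res).Nodup ∧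
     (∀ x ∈ res, x ∈ pvBLoop (pvBChildren pm root) fuel stack res) ∧
     (∀ x ∈ pvBLoop (pvBChildren pm root) fuel stack res, pvGood pm root x) ∧
     (∀ u ∈ pvBLoop (pvBChildren pm root) fuel stack res,
        ∀ c ∈ (pvBChildren pm root).getD u [], c ∈ pvBLoop (pvBChildren pm root) fuel stack res)) := by
  intro fuel
  induction fuel with
  | zero =>
    intro stack res h1 h2 h3 h4 h5 h6 h7
    -- fuel 0 forces res.length > stack.length + bound, but res is a nodup list of Good
    -- elements, all in root :: keys-set, so res.length ≤ bound: contradiction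
    exfalso
    have hsub : ∀ x ∈ res, x ∈ root :: PySem.Set.ofList (pm.map Prod.fst) := by
      intro x hx
      rcases h4 x hx with hx' | hx'
      · exact hx' ▸ List.mem_cons_self
      · exact List.mem_cons_of_mem _ ((PySem.Set.mem_ofList _ _).2 hx'.1)
    have := (h1.subperm hsub).length_le
    simp only [List.length_cons] at this
    omega
  | succ f ih =>
    intro stack res h1 h2 h3 h4 h5 h6 h7
    rw [pvBLoop]
    by_cases hs : stack = []
    · rw [dif_pos hs]
      subst hs
      exact ⟨h1, fun x hx => hx, h4, fun u hu c hc => h6 u hu (by simp) c hc⟩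
    · rw [dif_neg hs]
      have hnode : stack.getLast hs ∈ res := h3 _ (List.getLast_mem hs)
      have hnodeG : pvGood pm root (stack.getLast hs) := h4 _ hnode
      have hreachnode : pvReaches pm root (stack.getLast hs) := by
        rcases hnodeG with h | h
        · exact h ▸ pvReaches_root pm root
        · exact h.2
      have hrestnd : stack.dropLast.Nodup := h2.sublist (List.dropLast_sublist stack)
      have hrestsub : ∀ x ∈ stack.dropLast, x ∈ res :=
        fun x hx => h3 x (List.dropLast_subset stack hx)
      obtain ⟨i1, i2, i3, i4, i5, i6, i7, i8, i9⟩ :=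
        pvBFold_spec ((pvBChildren pm root).getD (stack.getLast hs) []) res stack.dropLast
          h1 hrestnd hrestsub
      -- the children pushed are Good
      have hcsG : ∀ c ∈ (pvBChildren pm root).getD (stack.getLast hs) [], pvGood pm root c := by
        intro c hc
        obtain ⟨hcp, hc0, hc1, hcr⟩ := pvBChildren_mem.1 hc
        have hlk : pm.lookup c = some (stack.getLast hs) := mem_lookup_of_nodup hnd hcp
        have hnh : pvHalts pm root c = false := by
          simp only [pvHalts, Bool.or_eq_false_iff, beq_eq_false_iff_ne, ne_eq,
            Option.isNone_eq_false_iff, Option.isSome_iff_ne_none]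
          exact ⟨⟨⟨hcr, hc1⟩, hc0⟩, by rw [hlk]; exact Option.some_ne_none _⟩
        have hstep : pvStep pm root c = stack.getLast hs := by
          unfold pvStep
          rw [if_neg (by tauto), hlk]
          rfl
        refine Or.inr ⟨List.mem_map_of_mem hcp, ?_⟩
        rw [reaches_iff_step hnh, hstep]
        exact hreachnode
      have hG' : ∀ x ∈ (((pvBChildren pm root).getD (stack.getLast hs) []).foldl
          (fun (rs : List Int × List Int) c =>
            if c ∈ rs.1 then rs else (PySem.Set.add rs.1 c, rs.2 ++ [c])) (res, stack.dropLast)).1,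
          pvGood pm root x := by
        intro x hx
        rcases i7 x hx with hx | hx
        · exact h4 x hx
        · exact hcsG x hx
      have hclosed' : ∀ u ∈ (((pvBChildren pm root).getD (stack.getLast hs) []).foldl
          (fun (rs : List Int × List Int) c =>
            if c ∈ rs.1 then rs else (PySem.Set.add rs.1 c, rs.2 ++ [c])) (res, stack.dropLast)).1,
          u ∉ (((pvBChildren pm root).getD (stack.getLast hs) []).foldl
          (fun (rs : List Int × List Int) c =>
            if c ∈ rs.1 then rs else (PySem.Set.add rs.1 c, rs.2 ++ [c])) (res, stack.dropLast)).2 →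
          ∀ c ∈ (pvBChildren pm root).getD u [], c ∈ (((pvBChildren pm root).getD (stack.getLast hs) []).foldl
          (fun (rs : List Int × List Int) c =>
            if c ∈ rs.1 then rs else (PySem.Set.add rs.1 c, rs.2 ++ [c])) (res, stack.dropLast)).1 := by
        intro u hu hustk c hc
        by_cases hun : u = stack.getLast hs
        · exact i6 c (hun ▸ hc)
        · rcases i8 u hu with hres | hstk2
          · have hnotdl : u ∉ stack.dropLast := fun hx => hustk (i5 u hx)
            have hnotstk : u ∉ stack := by
              intro hx
              rw [← List.dropLast_append_getLast hs] at hx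
              rcases List.mem_append.1 hx with hx | hx
              · exact hnotdl hx
              · exact hun (List.mem_singleton.1 hx)
            exact i4 c (h6 u hres hnotstk c hc)
          · exact absurd hstk2 hustk
      have harith : (((pvBChildren pm root).getD (stack.getLast hs) []).foldl
          (fun (rs : List Int × List Int) c =>
            if c ∈ rs.1 then rs else (PySem.Set.add rs.1 c, rs.2 ++ [c])) (res, stack.dropLast)).2.length +
          ((PySem.Set.ofList (pm.map Prod.fst)).length + 1) <
          f + (((pvBChildren pm root).getD (stack.getLast hs) []).foldl
          (fun (rs : List Int × List Int) c =>
            if c ∈ rs.1 then rs else (PySem.Set.add rs.1 c, rs.2 ++ [c])) (res, stack.dropLast)).1.length := by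
        have hdl : stack.dropLast.length = stack.length - 1 := List.length_dropLast
        have hpos : 0 < stack.length := List.length_pos_iff.2 hs
        omega
      obtain ⟨j1, j2, j3, j4⟩ := ih _ _ i1 i2 i3 hG' (i4 root h5) hclosed' harith
      refine ⟨j1, ?_, j3, j4⟩
      exact fun x hx => j2 x (i4 x hx)

theorem pvB_run (pm : List (Int × Int)) (root : Int)
    (hnd : (pm.map Prod.fst).Nodup) :
    ((pvBLoop (pvBChildren pm root) (pm.length + 2) [root] [root]).Nodup ∧
     (∀ x ∈ ([root] : List Int), x ∈ pvBLoop (pvBChildren pm root) (pm.length + 2) [root] [root]) ∧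
     (∀ x ∈ pvBLoop (pvBChildren pm root) (pm.length + 2) [root] [root], pvGood pm root x) ∧
     (∀ u ∈ pvBLoop (pvBChildren pm root) (pm.length + 2) [root] [root],
        ∀ c ∈ (pvBChildren pm root).getD u [], c ∈ pvBLoop (pvBChildren pm root) (pm.length + 2) [root] [root])) := by
  refine pvBLoop_spec pm root hnd (pm.length + 2) [root] [root]
    (List.nodup_singleton root) (List.nodup_singleton root)
    (fun x hx => hx) ?_ (List.mem_singleton.2 rfl) ?_ ?_
  · intro x hx
    rw [List.mem_singleton.1 hx]
    exact Or.inl rfl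
  · intro u hu hustk
    exact absurd hu hustk
  · have h1 : (PySem.Set.ofList (pm.map Prod.fst)).length ≤ (pm.map Prod.fst).length :=
      PySem.Set.length_ofList_le _
    have h2 : (pm.map Prod.fst).length = pm.length := List.length_map _
    simp only [List.length_singleton]
    omega

theorem pvB_closed_mem (pm : List (Int × Int)) (root : Int) (R : List Int)
    (hroot : root ∈ R)
    (hclosed : ∀ u ∈ R, ∀ c ∈ (pvBChildren pm root).getD u [], c ∈ R) :
    ∀ (j : Nat) (x : Int), (pvStep pm root)^[j] x = root → x ∈ R := by
  intro j
  induction j with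
  | zero =>
    intro x hj
    rw [Function.iterate_zero_apply] at hj
    exact hj ▸ hroot
  | succ j ih =>
    intro x hj
    by_cases hxr : x = root
    · exact hxr ▸ hroot
    · rcases hH : pvHalts pm root x with _ | _
      · -- pvHalts x = false : x steps to its parent
        have hnn : pm.lookup x ≠ none := by
          simp only [pvHalts, Bool.or_eq_false_iff, Option.isNone_eq_false_iff,
            Option.isSome_iff_ne_none] at hH
          exact hH.2
        obtain ⟨p, hp⟩ := Option.ne_none_iff_exists'.1 hnn
        have hx01 : x ≠ 1 ∧ x ≠ 0 := by
          simp only [pvHalts, Bool.or_eq_false_iff, beq_eq_false_iff_ne, ne_eq] at hH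
          exact ⟨hH.1.1.2, hH.1.2⟩
        have hstep : pvStep pm root x = p := by
          unfold pvStep
          rw [if_neg (by tauto), hp]
          rfl
        rw [Function.iterate_succ_apply, hstep] at hj
        have hpR : p ∈ R := ih p hj
        have hxc : x ∈ (pvBChildren pm root).getD p [] :=
          pvBChildren_mem.2 ⟨lookup_mem hp, hx01.2, hx01.1, hxr⟩
        exact hclosed p hpR x hxc
      · -- pvHalts x = true : the chain is stuck at x ≠ root, contradiction
        exfalso
        rw [Function.iterate_fixed (pvStep_fix hH)] at hj
        exact hxr hj

theorem pvB_mem (pm : List (Int × Int)) (root : Int)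
    (hnd : (pm.map Prod.fst).Nodup) (x : Int) :
    x ∈ pvBLoop (pvBChildren pm root) (pm.length + 2) [root] [root] ↔ pvGood pm root x := by
  obtain ⟨j1, j2, j3, j4⟩ := pvB_run pm root hnd
  constructor
  · exact j3 x
  · intro hG
    have hroot : root ∈ pvBLoop (pvBChildren pm root) (pm.length + 2) [root] [root] :=
      j2 root (List.mem_singleton.2 rfl)
    rcases hG with hxr | ⟨_, j, hj⟩
    · exact hxr ▸ hroot
    · exact pvB_closed_mem pm root _ hroot j4 j x hj

theorem pv_no_reach (pm : List (Int × Int)) (root : Int)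
    (hg1 : pm.lookup root = none) (hg2 : (pvBChildren pm root).contains root = false) :
    ∀ (j : Nat) (x : Int), x ∈ pm.map Prod.fst → (pvStep pm root)^[j] x = root → False := by
  have hrk : root ∉ pm.map Prod.fst := lookup_eq_none_iff.1 hg1
  intro j
  induction j with
  | zero =>
    intro x hxk hj
    rw [Function.iterate_zero_apply] at hj
    exact hrk (hj ▸ hxk)
  | succ j ih =>
    intro x hxk hj
    by_cases hxr : x = root
    · exact hrk (hxr ▸ hxk)
    · rcases hH : pvHalts pm root x with _ | _
      · have hnn : pm.lookup x ≠ none := by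
          simp only [pvHalts, Bool.or_eq_false_iff, Option.isNone_eq_false_iff,
            Option.isSome_iff_ne_none] at hH
          exact hH.2
        obtain ⟨p, hp⟩ := Option.ne_none_iff_exists'.1 hnn
        have hx01 : x ≠ 1 ∧ x ≠ 0 := by
          simp only [pvHalts, Bool.or_eq_false_iff, beq_eq_false_iff_ne, ne_eq] at hH
          exact ⟨hH.1.1.2, hH.1.2⟩
        have hstep : pvStep pm root x = p := by
          unfold pvStep
          rw [if_neg (by tauto), hp]
          rfl
        rw [Function.iterate_succ_apply, hstep] at hj
        by_cases hpr : p = root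
        · -- x is a child of root: the inverted map would contain root
          have hxc : x ∈ (pvBChildren pm root).getD root [] :=
            pvBChildren_mem.2 ⟨hpr ▸ lookup_mem hp, hx01.2, hx01.1, hxr⟩
          have : (pvBChildren pm root).contains root = true :=
            (pvBChildren_contains pm root root).2 (List.ne_nil_of_mem hxc)
          rw [hg2] at this
          cases this
        · rcases hHp : pvHalts pm root p with _ | _
          · have hpn : pm.lookup p ≠ none := by
              simp only [pvHalts, Bool.or_eq_false_iff, Option.isNone_eq_false_iff,
                Option.isSome_iff_ne_none] at hHp
              exact hHp.2
            obtain ⟨q, hq⟩ := Option.ne_none_iff_exists'.1 hpn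
            exact ih p (lookup_mem_keys hq) hj
          · rw [Function.iterate_fixed (pvStep_fix hHp)] at hj
            exact hpr hj
      · rw [Function.iterate_fixed (pvStep_fix hH)] at hj
        exact hxr hj

theorem pv_have_reach (pm : List (Int × Int)) (root : Int)
    (hnd : (pm.map Prod.fst).Nodup)
    (hg : ¬ (pm.lookup root = none ∧ ¬ (pvBChildren pm root).contains root = true)) :
    ∃ k ∈ pm.map Prod.fst, pvReaches pm root k := by
  by_cases hl : pm.lookup root = none
  · have hc : (pvBChildren pm root).contains root = true := by tauto
    obtain ⟨c, hc⟩ := List.exists_mem_of_ne_nil _ ((pvBChildren_contains pm root root).1 hc)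
    obtain ⟨hcp, hc0, hc1, hcr⟩ := pvBChildren_mem.1 hc
    refine ⟨c, List.mem_map_of_mem hcp, 1, ?_⟩
    rw [Function.iterate_one]
    unfold pvStep
    rw [if_neg (by tauto), mem_lookup_of_nodup hnd hcp]
    rfl
  · obtain ⟨p, hp⟩ := Option.ne_none_iff_exists'.1 hl
    exact ⟨root, lookup_mem_keys hp, pvReaches_root pm root⟩

-- ===== VERDICT (by name: the statement is the Claim_ definition above) =====
theorem descendants_of_py_spec : Claim_equal_descendants_of_py := by
  intro pm root _hdom hpre
  unfold Spec_descendants_of_py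
  unfold descendants_of_py descendants_of_py_alt
  by_cases hg : pm.lookup root = none ∧ ¬ (pvBChildren pm root).contains root = true
  · rw [if_pos hg]
    have hnil : (pm.foldl (fun (MN : List Int × List Int) p =>
        (pvAWalk pm root (pm.length + 1) [] p.1 MN.1 MN.2).2) ([], [])).1 = [] := by
      rw [List.eq_nil_iff_forall_not_mem]
      intro x hx
      rcases (pvA_members_iff pm root hpre x).1 hx with ⟨hk, j, hj⟩ | ⟨_, k, hk, j, hj⟩
      · exact pv_no_reach pm root hg.1 (by simpa using hg.2) j x hk hj
      · exact pv_no_reach pm root hg.1 (by simpa using hg.2) j k hk hj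
    rw [hnil]
    rfl
  · rw [if_neg hg]
    have hex := pv_have_reach pm root hpre.1 hg
    refine PySem.List.sorted_eq_sorted_of_perm _ _ _ (fun a b hab => hab) ?_
    refine (List.perm_ext_iff_of_nodup (pvA_members_nodup pm root hpre) (pvB_run pm root hpre.1).1).2 ?_
    intro a
    rw [pvA_members_iff pm root hpre a, pvB_mem pm root hpre.1 a]
    constructor
    · rintro (⟨hk, hr⟩ | ⟨har, _⟩)
      · exact Or.inr ⟨hk, hr⟩
      · exact Or.inl har
    · rintro (har | ⟨hk, hr⟩)
      · exact Or.inr ⟨har, hex⟩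
      · exact Or.inl ⟨hk, hr⟩
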